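-- pv_equiv track=rewrite | github.com/icellan/runar | compilers/python/tests/test_conformance_goldens.py | _short_diff
-- ===== SOURCE A (Python) =====
-- def _short_diff(expected: str, actual: str, limit: int = 12) -> str:
--     exp_lines = expected.splitlines()
--     act_lines = actual.splitlines()
--     out: list[str] = []
--     shown = 0
--     for i in range(max(len(exp_lines), len(act_lines))):
--         e = exp_lines[i] if i < len(exp_lines) else "<EOF>"
--         a = act_lines[i] if i < len(act_lines) else "<EOF>"
--         if e != a:
--             out.append(f"    line {i + 1}:")
--             out.append(f"      - expected: {e}")
--             out.append(f"      + actual:   {a}")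
--             shown += 1
--             if shown >= limit:
--                 out.append("    ... (truncated)")
--                 break
--     if not out:
--         out.append("    (strings differ but no line diff; likely trailing whitespace)")
--     return "\n".join(out)
-- ===== SOURCE B (Python) =====
-- def _short_diff(expected: str, actual: str, limit: int = 12) -> str:
--     def go(exp, act, num, budget):
--         if not exp and not act:
--             return []
--         e = exp[0] if exp else "<EOF>"
--         a = act[0] if act else "<EOF>"
--         if e == a:
--             return go(exp[1:], act[1:], num + 1, budget)
--         block = [f"    line {num}:", f"      - expected: {e}", f"      + actual:   {a}"]
--         if budget <= 1:
--             return block + ["    ... (truncated)"]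
--         return block + go(exp[1:], act[1:], num + 1, budget - 1)
--
--     lines = go(expected.splitlines(), actual.splitlines(), 1, limit)
--     if not lines:
--         return "    (strings differ but no line diff; likely trailing whitespace)"
--     return "\n".join(lines)
-- ===== Notes on version B (the rewrite author's own statement) =====
-- stated objective: alternative
-- what changed: Replaces A's index loop over range(max(len,len)) with mutable out/shown counters by a structural recursion over the two line lists carrying a line number and a remaining budget; the budget<=1 base case emits the block plus the truncation marker.
import Mathlib
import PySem

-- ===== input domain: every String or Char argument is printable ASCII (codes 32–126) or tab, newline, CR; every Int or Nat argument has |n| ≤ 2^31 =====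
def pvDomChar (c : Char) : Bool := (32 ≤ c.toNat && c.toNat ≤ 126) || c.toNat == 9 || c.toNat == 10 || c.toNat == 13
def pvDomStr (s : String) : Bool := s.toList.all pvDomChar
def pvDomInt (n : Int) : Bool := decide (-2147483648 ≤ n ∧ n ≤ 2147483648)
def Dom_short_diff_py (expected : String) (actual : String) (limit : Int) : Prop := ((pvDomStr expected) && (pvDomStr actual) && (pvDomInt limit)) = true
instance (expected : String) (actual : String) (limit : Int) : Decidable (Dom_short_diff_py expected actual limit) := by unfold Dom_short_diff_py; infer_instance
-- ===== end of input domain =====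

-- B replaces A's index loop (range over the max line count, mutable out/shown counters) by a
-- structural recursion over the two line lists carrying a line number and a remaining budget;
-- objective: alternative decomposition, same cost.

-- ===== PORT A =====
-- the for-loop with break, as structural recursion on the remaining index range
def pvALoop (expL actL : List String) (limit : Int) (n : Nat) (i : Nat)
    (out : List String) (shown : Int) : List String :=
  if i < n then
    let e := expL.getD i "<EOF>"
    let a := actL.getD i "<EOF>"
    if e ≠ a then
      let out2 := out ++ ["    line " ++ PySem.Int.toStr ((i : Int) + 1) ++ ":",
                          "      - expected: " ++ e,
                          "      + actual:   " ++ a]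
      let shown2 := shown + 1
      if shown2 ≥ limit then out2 ++ ["    ... (truncated)"]
      else pvALoop expL actL limit n (i + 1) out2 shown2
    else pvALoop expL actL limit n (i + 1) out shown
  else out
termination_by n - i

def short_diff_py (expected : String) (actual : String) (limit : Int) : String :=
  let expL := PySem.Str.splitlines expected
  let actL := PySem.Str.splitlines actual
  let out := pvALoop expL actL limit (max expL.length actL.length) 0 [] 0
  let out := if out = [] then ["    (strings differ but no line diff; likely trailing whitespace)"] else out
  PySem.Str.join "\n" out

-- ===== PORT B =====
-- B's inner 'go': recursion over the two line lists with line number and remaining budget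
def pvGo (exp_ act : List String) (num budget : Int) : List String :=
  if exp_ = [] ∧ act = [] then []
  else
    let e := exp_.headD "<EOF>"
    let a := act.headD "<EOF>"
    if e = a then pvGo exp_.tail act.tail (num + 1) budget
    else
      let block := ["    line " ++ PySem.Int.toStr num ++ ":",
                    "      - expected: " ++ e,
                    "      + actual:   " ++ a]
      if budget ≤ 1 then block ++ ["    ... (truncated)"]
      else block ++ pvGo exp_.tail act.tail (num + 1) (budget - 1)
termination_by exp_.length + act.length
decreasing_by
  all_goals cases exp_ <;> cases act <;> simp_all <;> omega

def short_diff_py_alt (expected : String) (actual : String) (limit : Int) : String :=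
  let lines := pvGo (PySem.Str.splitlines expected) (PySem.Str.splitlines actual) 1 limit
  if lines = [] then "    (strings differ but no line diff; likely trailing whitespace)"
  else PySem.Str.join "\n" lines

-- ===== PRECONDITION & SPEC =====
def Spec_short_diff_py (expected : String) (actual : String) (limit : Int) (out : String) : Prop := out = short_diff_py_alt expected actual limit
instance (expected : String) (actual : String) (limit : Int) (out : String) : Decidable (Spec_short_diff_py expected actual limit out) := by unfold Spec_short_diff_py; infer_instance

-- ===== CLAIM (what is proved, stated in full; the proofs are below) =====
def Claim_equal_short_diff_py : Prop := ∀ (expected : String) (actual : String) (limit : Int), Dom_short_diff_py expected actual limit → Spec_short_diff_py expected actual limit (short_diff_py expected actual limit)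

-- ===== LEMMAS AND PROOFS =====

theorem pv_headD_drop (l : List String) (i : Nat) :
    (l.drop i).headD "<EOF>" = l.getD i "<EOF>" := by
  simp [List.headD_eq_head?_getD, List.head?_drop, List.getD_eq_getElem?_getD]

theorem pv_tail_drop (l : List String) (i : Nat) : (l.drop i).tail = l.drop (i + 1) := by
  rw [← List.drop_drop]; simp

theorem pvALoop_eq_go (expL actL : List String) (limit : Int) (k : Nat) :
    ∀ (i : Nat) (out : List String) (shown : Int),
      max expL.length actL.length - i = k →
      pvALoop expL actL limit (max expL.length actL.length) i out shown
        = out ++ pvGo (expL.drop i) (actL.drop i) ((i : Int) + 1) (limit - shown) := by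
  induction k with
  | zero =>
    intro i out shown hk
    have h1 : expL.length ≤ i := by omega
    have h2 : actL.length ≤ i := by omega
    rw [pvALoop, if_neg (by omega), List.drop_eq_nil_of_le h1, List.drop_eq_nil_of_le h2,
        pvGo]
    simp
  | succ k ih =>
    intro i out shown hk
    have hlt : i < max expL.length actL.length := by omega
    have hne : ¬ (expL.drop i = [] ∧ actL.drop i = []) := by
      rw [List.drop_eq_nil_iff, List.drop_eq_nil_iff]; omega
    rw [pvALoop, if_pos hlt, pvGo, if_neg hne]
    simp only [pv_headD_drop, pv_tail_drop]
    by_cases hd : expL.getD i "<EOF>" = actL.getD i "<EOF>"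
    · simp only [hd, ne_eq, not_true_eq_false, if_false]
      rw [ih (i + 1) out shown (by omega)]
      push_cast; ring_nf
    · simp only [ne_eq, hd, not_false_eq_true, if_pos]
      by_cases hb : shown + 1 ≥ limit
      · rw [if_pos hb, if_pos (show limit - shown ≤ 1 by omega)]
        simp [List.append_assoc]
      · rw [if_neg hb, if_neg (show ¬ limit - shown ≤ 1 by omega)]
        rw [ih (i + 1) _ (shown + 1) (by omega)]
        have : limit - shown - 1 = limit - (shown + 1) := by omega
        rw [this]; push_cast; ring_nf
        simp [List.append_assoc]

-- ===== VERDICT (by name: the statement is the Claim_ definition above) =====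
theorem short_diff_py_spec : Claim_equal_short_diff_py := by
  intro expected actual limit _
  unfold Spec_short_diff_py
  simp only [short_diff_py, short_diff_py_alt]
  generalize PySem.Str.splitlines expected = expL
  generalize PySem.Str.splitlines actual = actL
  rw [pvALoop_eq_go expL actL limit (max expL.length actL.length - 0) 0 [] 0 rfl]
  simp only [List.drop_zero, List.nil_append, Nat.cast_zero, zero_add, sub_zero]
  by_cases h : pvGo expL actL 1 limit = []
  · simp [h, PySem.Str.join]
  · rw [if_neg h, if_neg h]
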